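-- pv_equiv track=rewrite | github.com/faterazer/LeetCode | 1111. Maximum Nesting Depth of Two Valid Parentheses Strings/maximum_nesting_depth_of_two_valid_parentheses_strings.py | maxDepthAfterSplit_MK1
-- ===== SOURCE A (Python) =====
-- from typing import List
--
-- def maxDepthAfterSplit_MK1(seq: str) -> List[int]:
--     ret = []
--     d = 0
--     for ch in seq:
--         if ch == '(':
--             ret.append(d % 2)
--             d += 1
--         else:
--             d -= 1
--             ret.append(d % 2)
--     return ret
-- ===== SOURCE B (Python) =====
-- from typing import List
--
-- def maxDepthAfterSplit_MK1(seq: str) -> List[int]: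
--     depths = [0]
--     for ch in seq:
--         depths.append(depths[-1] + (1 if ch == '(' else -1))
--     return [min(depths[i], depths[i + 1]) % 2 for i in range(len(seq))]
-- ===== Notes on version B (the rewrite author's own statement) =====
-- stated objective: alternative
-- what changed: Replaces the single branch-per-char scan that appends d%2 while mutating d with a two-pass scheme: first build the prefix-depth table, then map each adjacent depth pair to min(pair)%2.
import Mathlib
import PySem

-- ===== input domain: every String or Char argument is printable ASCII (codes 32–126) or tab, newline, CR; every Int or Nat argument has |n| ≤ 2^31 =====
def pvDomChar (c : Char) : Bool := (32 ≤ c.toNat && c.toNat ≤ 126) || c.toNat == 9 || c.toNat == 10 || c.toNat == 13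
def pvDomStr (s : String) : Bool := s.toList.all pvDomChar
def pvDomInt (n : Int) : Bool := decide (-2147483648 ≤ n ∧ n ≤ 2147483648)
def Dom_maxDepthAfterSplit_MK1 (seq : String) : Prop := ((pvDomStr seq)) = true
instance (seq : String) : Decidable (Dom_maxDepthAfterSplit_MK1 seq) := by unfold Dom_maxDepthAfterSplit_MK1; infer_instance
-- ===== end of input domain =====

-- B rewrites A's single incremental branch-per-char scan as a prefix-depth table
-- followed by an adjacent-pair mapping pass (objective: alternative decomposition).

-- ===== PORT A =====
-- A's loop over seq with state (ret, d), transcribed as structural recursion.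
def pvGoA : List Char → Int → List Int
  | [], _ => []
  | ch :: rest, d =>
    if ch = '(' then PySem.Int.mod d 2 :: pvGoA rest (d + 1)
    else PySem.Int.mod (d - 1) 2 :: pvGoA rest (d - 1)

def maxDepthAfterSplit_MK1 (seq : String) : List Int := pvGoA seq.toList 0

-- ===== PORT B =====
-- first pass: prefix depths (depths[0]=0, each char adds +1 or -1)
def pvDepths : List Char → Int → List Int
  | [], d => [d]
  | ch :: rest, d => d :: pvDepths rest (d + (if ch = '(' then 1 else -1))

-- second pass: parity of the lower of the two depths flanking each character
def maxDepthAfterSplit_MK1_alt (seq : String) : List Int :=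
  let depths := pvDepths seq.toList 0
  (depths.zip depths.tail).map (fun p => PySem.Int.mod (min p.1 p.2) 2)

-- ===== PRECONDITION & SPEC =====
def Spec_maxDepthAfterSplit_MK1 (seq : String) (out : List Int) : Prop := out = maxDepthAfterSplit_MK1_alt seq
instance (seq : String) (out : List Int) : Decidable (Spec_maxDepthAfterSplit_MK1 seq out) := by unfold Spec_maxDepthAfterSplit_MK1; infer_instance

-- ===== CLAIM (what is proved, stated in full; the proofs are below) =====
def Claim_equal_maxDepthAfterSplit_MK1 : Prop := ∀ (seq : String), Dom_maxDepthAfterSplit_MK1 seq → Spec_maxDepthAfterSplit_MK1 seq (maxDepthAfterSplit_MK1 seq)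

-- ===== LEMMAS AND PROOFS =====
theorem pvDepths_head (cs : List Char) (d : Int) :
    ∃ t, pvDepths cs d = d :: t := by
  cases cs <;> simp [pvDepths]

theorem pvGoA_eq (cs : List Char) (d : Int) :
    pvGoA cs d =
      ((pvDepths cs d).zip (pvDepths cs d).tail).map
        (fun p => PySem.Int.mod (min p.1 p.2) 2) := by
  induction cs generalizing d with
  | nil => simp [pvGoA, pvDepths]
  | cons ch rest ih =>
    by_cases h : ch = '('
    · obtain ⟨t, ht⟩ := pvDepths_head rest (d + 1)
      simp [pvGoA, pvDepths, h, ht, ih, min_def]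
    · obtain ⟨t, ht⟩ := pvDepths_head rest (d - 1)
      have hd : d + -1 = d - 1 := by ring
      simp [pvGoA, pvDepths, h, ht, ih, hd, min_def]

-- ===== VERDICT (by name: the statement is the Claim_ definition above) =====
theorem maxDepthAfterSplit_MK1_spec : Claim_equal_maxDepthAfterSplit_MK1 := by
  intro seq _
  unfold Spec_maxDepthAfterSplit_MK1 maxDepthAfterSplit_MK1 maxDepthAfterSplit_MK1_alt
  exact pvGoA_eq seq.toList 0
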